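-- pv_equiv track=rewrite | github.com/linhdvu14/cp-sols | sols/Google/CodeJamIO/2021/A_Impartial_Offerings.py | solve
-- ===== SOURCE A (Python) =====
-- def solve(n, nums):
-- 	count = {}
-- 	for num in nums:
-- 		if num not in count: count[num] = 0
-- 		count[num] += 1
-- 	skeys = sorted(count.keys())
-- 	res = 0
-- 	for i, k in enumerate(skeys):
-- 		res += count[k]*(i+1)
-- 	return res
-- ===== SOURCE B (Python) =====
-- def solve(n, nums):
-- 	res = 0
-- 	rank = 0
-- 	prev = None
-- 	for v in sorted(nums):
-- 		if prev != v:
-- 			rank += 1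
-- 			prev = v
-- 		res += rank
-- 	return res
-- ===== Notes on version B (the rewrite author's own statement) =====
-- stated objective: alternative
-- what changed: B drops A's frequency dict and enumerate-over-distinct-keys pass: it sorts the raw list once and sums a running rank (incremented on each new value) in a single pass, so no hash table is built or indexed.
import Mathlib
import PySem

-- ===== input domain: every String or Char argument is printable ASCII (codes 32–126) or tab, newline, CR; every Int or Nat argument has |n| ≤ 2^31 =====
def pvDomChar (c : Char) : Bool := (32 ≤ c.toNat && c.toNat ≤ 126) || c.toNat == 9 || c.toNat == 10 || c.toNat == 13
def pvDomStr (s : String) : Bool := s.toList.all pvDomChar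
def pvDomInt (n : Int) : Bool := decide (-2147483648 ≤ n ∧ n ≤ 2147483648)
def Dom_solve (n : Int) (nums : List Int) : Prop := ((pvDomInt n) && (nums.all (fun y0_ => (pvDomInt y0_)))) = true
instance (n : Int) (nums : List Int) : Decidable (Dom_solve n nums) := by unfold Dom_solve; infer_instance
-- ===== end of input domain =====

-- B replaces A's frequency dict + enumerate-over-distinct-keys pass by one pass over the sorted
-- raw list with a running rank (objective: alternative decomposition, same asymptotic cost).


-- ===== PORT A =====
def solve (n : Int) (nums : List Int) : Int :=
  let count : PySem.Dict Int Int :=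
    nums.foldl (fun d num =>
      let d' := if d.contains num then d else d.insert num 0   -- if num not in count: count[num] = 0
      d'.modify num 0 (· + 1))                                 -- count[num] += 1  (key is present, so getD default 0 is exact)
      PySem.Dict.empty
  let skeys := PySem.List.sorted count.keys (fun k => k)
  (PySem.List.enumerate skeys 0).foldl (fun res ik => res + count.getD ik.2 0 * (ik.1 + 1)) 0

-- ===== PORT B =====
-- loop body of Source B's single pass; state = (res, rank, prev)
def stepB (st : Int × Int × Option Int) (v : Int) : Int × Int × Option Int :=
  if st.2.2 ≠ some v then (st.1 + (st.2.1 + 1), st.2.1 + 1, some v)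
  else (st.1 + st.2.1, st.2.1, st.2.2)

def solve_alt (n : Int) (nums : List Int) : Int :=
  ((PySem.List.sorted nums (fun x => x)).foldl stepB (0, 0, none)).1

-- ===== PRECONDITION & SPEC =====
def Spec_solve (n : Int) (nums : List Int) (out : Int) : Prop := out = solve_alt n nums
instance (n : Int) (nums : List Int) (out : Int) : Decidable (Spec_solve n nums out) := by unfold Spec_solve; infer_instance

-- ===== CLAIM (what is proved, stated in full; the proofs are below) =====
def Claim_equal_solve : Prop := ∀ (n : Int) (nums : List Int), Dom_solve n nums → Spec_solve n nums (solve n nums)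

-- ===== LEMMAS AND PROOFS =====

-- overwriting an overwritten key: the inner insert is absorbed
theorem insert_insert_self (d : PySem.Dict Int Int) (k v w : Int) :
    (d.insert k v).insert k w = d.insert k w := by
  obtain ⟨items⟩ := d
  cases h : (PySem.Dict.mk items : PySem.Dict Int Int).contains k with
  | true =>
    simp only [PySem.Dict.insert, h, if_pos]
    have h2 : (PySem.Dict.mk (items.map (fun p => if p.1 == k then (k, v) else p)) : PySem.Dict Int Int).contains k = true := by
      simp only [PySem.Dict.contains, List.any_map] at h ⊢
      revert h; simp only [List.any_eq_true]
      rintro ⟨p, hp, hpk⟩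
      exact ⟨p, hp, by simp [Function.comp, hpk]⟩
    simp only [h2, if_pos, List.map_map]
    congr 1
    apply List.map_congr_left
    intro p _
    by_cases hpk : (p.1 == k) = true <;> simp [Function.comp, hpk]
  | false =>
    have hnone : ∀ p ∈ items, (p.1 == k) = false := by
      intro p hp
      by_contra hc
      have : (PySem.Dict.mk items : PySem.Dict Int Int).contains k = true := by
        simp only [PySem.Dict.contains, List.any_eq_true]
        exact ⟨p, hp, by simpa using hc⟩
      simp [this] at h
    simp only [PySem.Dict.insert, h, Bool.false_eq_true, if_false]
    have h2 : (PySem.Dict.mk (items ++ [(k, v)]) : PySem.Dict Int Int).contains k = true := by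
      simp [PySem.Dict.contains]
    have hmap : items.map (fun p => if p.1 == k then (k, w) else p) = items := by
      conv_rhs => rw [← List.map_id items]
      apply List.map_congr_left
      intro p hp
      simp [hnone p hp]
    simp only [h2, if_pos]
    congr 1
    rw [List.map_append, hmap]
    simp

-- A's counting loop is Counter(nums): the 'seed 0 then += 1' step equals the counter step
theorem countA_eq_counter (nums : List Int) :
    nums.foldl (fun d num =>
      let d' := if d.contains num then d else d.insert num 0
      d'.modify num 0 (· + 1)) PySem.Dict.empty = PySem.Dict.counter nums := by
  rw [PySem.Dict.counter]
  apply PySem.List.foldl_congr_mem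
  intro d x _
  cases h : d.contains x with
  | true => simp
  | false =>
    simp only [Bool.false_eq_true, if_false, PySem.Dict.modify,
      PySem.Dict.getD_insert_self, insert_insert_self,
      PySem.Dict.getD_of_not_contains d 0 h]

-- the rank-weighted sum both programs compute, recursively over the distinct sorted keys
def Ssum (c : Int → Nat) : List Int → Int → Int
  | [], _ => 0
  | k :: rest, r => (c k : Int) * (r + 1) + Ssum c rest (r + 1)

theorem enum_sum_eq_Ssum (c : Int → Nat) (keys : List Int) :
    ∀ r : Int, ((PySem.List.enumerate keys r).map (fun ik => (c ik.2 : Int) * (ik.1 + 1))).sum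
      = Ssum c keys r := by
  induction keys with
  | nil => intro r; simp [PySem.List.enumerate_nil, Ssum]
  | cons k rest ih =>
    intro r
    rw [PySem.List.enumerate_cons]
    simp only [List.map_cons, List.sum_cons, ih (r + 1), Ssum]

-- running stepB over equal values with prev already equal to them adds count*rank
theorem stepB_replicate (k : Int) (m : Nat) : ∀ (res r : Int),
    (List.replicate m k).foldl stepB (res, r, some k) = (res + m * r, r, some k) := by
  induction m with
  | zero => intro res r; simp
  | succ m ih =>
    intro res r
    rw [List.replicate_succ, List.foldl_cons]
    simp only [stepB, ne_eq, not_true_eq_false, if_false]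
    rw [ih]
    congr 1
    push_cast; ring

-- a whole block of a new value bumps the rank once, then adds count*(new rank)
theorem stepB_group (k : Int) (c : Nat) (hc : 0 < c) (res r : Int) (p : Option Int)
    (hp : p ≠ some k) :
    (List.replicate c k).foldl stepB (res, r, p) = (res + c * (r + 1), r + 1, some k) := by
  obtain ⟨m, rfl⟩ : ∃ m, c = m + 1 := ⟨c - 1, by omega⟩
  rw [List.replicate_succ, List.foldl_cons]
  simp only [stepB, ne_eq, hp, not_false_eq_true, if_pos]
  rw [stepB_replicate]
  congr 1
  push_cast; ring

-- B's whole loop over the grouped sorted list computes Ssum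
theorem stepB_flatMap (c : Int → Nat) (keys : List Int) (hnd : keys.Nodup)
    (hpos : ∀ k ∈ keys, 0 < c k) :
    ∀ (res r : Int) (p : Option Int), (∀ k ∈ keys, p ≠ some k) →
    ((keys.flatMap (fun k => List.replicate (c k) k)).foldl stepB (res, r, p)).1
      = res + Ssum c keys r := by
  induction keys with
  | nil => intro res r p _; simp [Ssum]
  | cons k rest ih =>
    intro res r p hp
    rw [List.flatMap_cons, List.foldl_append]
    rw [stepB_group k (c k) (hpos k (by simp)) res r p (hp k (by simp))]
    rw [ih hnd.of_cons (fun k' hk' => hpos k' (by simp [hk'])) _ _ _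
        (fun k' hk' => by
          simp only [ne_eq, Option.some.injEq]
          rintro rfl
          exact (List.nodup_cons.mp hnd).1 hk')]
    simp [Ssum]; ring

theorem count_flatMap_replicate (c : Int → Nat) (v : Int) :
    ∀ keys : List Int, keys.Nodup →
    (keys.flatMap (fun k => List.replicate (c k) k)).count v
      = if v ∈ keys then c v else 0 := by
  intro keys
  induction keys with
  | nil => simp
  | cons k rest ih =>
    intro hnd
    rw [List.flatMap_cons, List.count_append, ih hnd.of_cons, List.count_replicate]
    by_cases hvk : v = k
    · subst hvk
      simp [(List.nodup_cons.mp hnd).1]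
    · simp [hvk, Ne.symm hvk]

-- sorted(nums) is the sorted distinct keys expanded by their multiplicities
theorem sorted_eq_flatMap (nums : List Int) :
    PySem.List.sorted nums (fun x => x)
      = (PySem.List.sorted (PySem.Set.ofList nums) (fun k => k)).flatMap
          (fun k => List.replicate (nums.count k) k) := by
  have hperm := PySem.List.sorted_perm (PySem.Set.ofList nums) (fun k => k) false
  have hnd : (PySem.List.sorted (PySem.Set.ofList nums) (fun k => k)).Nodup :=
    hperm.nodup_iff.mpr (PySem.Set.nodup_ofList nums)
  have hle := PySem.List.sorted_pairwise (PySem.Set.ofList nums) (fun k => k)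
  have hlt : (PySem.List.sorted (PySem.Set.ofList nums) (fun k => k)).Pairwise (· < ·) :=
    (hle.and hnd).imp (fun h => lt_of_le_of_ne h.1 h.2)
  have hmem : ∀ v : Int, v ∈ PySem.List.sorted (PySem.Set.ofList nums) (fun k => k) ↔ v ∈ nums := by
    intro v
    rw [hperm.mem_iff, PySem.Set.mem_ofList]
  apply PySem.List.eq_of_perm_of_pairwise_le_of_injective (fun x : Int => x) (fun a b h => h)
  · refine ((PySem.List.sorted_perm nums (fun x => x) false).trans ?_)
    rw [List.perm_iff_count]
    intro v
    rw [count_flatMap_replicate _ v _ hnd]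
    by_cases hv : v ∈ nums
    · rw [if_pos ((hmem v).mpr hv)]
    · rw [if_neg (fun h => hv ((hmem v).mp h)), List.count_eq_zero_of_not_mem hv]
  · exact PySem.List.sorted_pairwise nums (fun x => x)
  · rw [List.pairwise_flatMap]
    constructor
    · intro k _
      rw [List.pairwise_replicate]
      right; exact le_refl k
    · apply hlt.imp_of_mem
      intro a b _ _ hab x hx y hy
      rw [List.eq_of_mem_replicate hx, List.eq_of_mem_replicate hy]
      exact le_of_lt hab

theorem solve_eq_alt (n : Int) (nums : List Int) : solve n nums = solve_alt n nums := by
  have hnd : (PySem.List.sorted (PySem.Set.ofList nums) (fun k => k)).Nodup :=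
    (PySem.List.sorted_perm (PySem.Set.ofList nums) (fun k => k) false).nodup_iff.mpr
      (PySem.Set.nodup_ofList nums)
  have hmem : ∀ k : Int, k ∈ PySem.List.sorted (PySem.Set.ofList nums) (fun k => k) → k ∈ nums := by
    intro k hk
    exact (PySem.Set.mem_ofList nums k).mp
      ((PySem.List.sorted_perm (PySem.Set.ofList nums) (fun k => k) false).mem_iff.mp hk)
  rw [solve, solve_alt, countA_eq_counter, PySem.Dict.keys_counter]
  simp only [PySem.Dict.getD_counter]
  rw [PySem.List.foldl_add, enum_sum_eq_Ssum (fun k => nums.count k), zero_add]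
  conv_rhs => rw [sorted_eq_flatMap nums]
  rw [stepB_flatMap (fun k => nums.count k) _ hnd
    (fun k hk => List.count_pos_iff.mpr (hmem k hk)) 0 0 none (fun k _ => by simp)]
  rw [zero_add]

-- ===== VERDICT (by name: the statement is the Claim_ definition above) =====
theorem solve_spec : Claim_equal_solve := by
  intro n nums _
  unfold Spec_solve
  exact solve_eq_alt n nums
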